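-- pv_equiv track=rewrite | github.com/Asurelia/botting | modules/professions/farmer_refactored.py | _zigzag_pattern
-- ===== SOURCE A (Python) =====
-- from typing import Dict, List, Tuple, Optional, Any
--
-- def _zigzag_pattern(start_pos: Tuple[int, int], resources_count: int) -> List[Tuple[int, int]]:
--     """Pattern en zigzag de collecte"""
--     positions = []
--     x, y = start_pos
--
--     row = 0
--     while len(positions) < resources_count:
--         if row % 2 == 0:
--             # Ligne de gauche à droite
--             for i in range(5):
--                 if len(positions) >= resources_count:
--                     break
--                 positions.append((x + i, y + row))
--         else:
--             # Ligne de droite à gauche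
--             for i in range(4, -1, -1):
--                 if len(positions) >= resources_count:
--                     break
--                 positions.append((x + i, y + row))
--
--         row += 1
--
--     return positions[:resources_count]
-- ===== SOURCE B (Python) =====
-- def _zigzag_pattern(start_pos, resources_count):
--     """Zigzag grid positions computed directly from each flat index."""
--     x, y = start_pos
--     positions = []
--     for n in range(resources_count):
--         row, k = divmod(n, 5)
--         i = k if row % 2 == 0 else 4 - k
--         positions.append((x + i, y + row))
--     return positions
-- ===== Notes on version B (the rewrite author's own statement) =====
-- stated objective: simpler
-- what changed: Replaces the outer while-over-rows with a break-guarded reversible inner for-loop and a final slice by a single flat loop over range(resources_count) that computes each coordinate in closed form via divmod(n, 5).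
import Mathlib
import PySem

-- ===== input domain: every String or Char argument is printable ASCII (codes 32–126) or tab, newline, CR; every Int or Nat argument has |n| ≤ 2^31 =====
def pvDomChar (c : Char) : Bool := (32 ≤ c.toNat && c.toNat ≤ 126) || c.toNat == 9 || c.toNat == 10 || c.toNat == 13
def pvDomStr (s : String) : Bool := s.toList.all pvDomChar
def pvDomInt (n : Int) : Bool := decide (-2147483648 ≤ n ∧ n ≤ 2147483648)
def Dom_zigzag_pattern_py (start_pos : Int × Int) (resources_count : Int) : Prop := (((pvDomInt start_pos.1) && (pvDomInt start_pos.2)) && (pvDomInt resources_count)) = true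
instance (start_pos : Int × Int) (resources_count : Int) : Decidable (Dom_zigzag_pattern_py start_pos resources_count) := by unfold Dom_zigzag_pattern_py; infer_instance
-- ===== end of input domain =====

-- B replaces A's row-by-row while loop (with break guards and a final slice) by one flat
-- loop computing each coordinate in closed form from its index; objective: simpler.

-- ===== PORT A =====
-- Inner 'for i in …: if len >= count: break; append' — the break is ported as a guard that
-- skips the append: once len >= count the guard stays false, so the value is identical.
-- the iteration range A's branch chooses: range(5) or range(4, -1, -1)
def pvIdxsA (row : Int) : List Int :=
  if PySem.Int.mod row 2 == 0 then PySem.List.pyRange 0 5 1 else PySem.List.pyRange 4 (-1) (-1)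

def pvRowStepA (x y row count : Int) (ps : List (Int × Int)) (idxs : List Int) : List (Int × Int) :=
  idxs.foldl (fun acc i => if (acc.length : Int) < count then acc ++ [(x + i, y + row)] else acc) ps

theorem pvRowStepA_len_le (x y row count : Int) (idxs : List Int) :
    ∀ ps : List (Int × Int), ps.length ≤ (pvRowStepA x y row count ps idxs).length := by
  induction idxs with
  | nil => intro ps; simp [pvRowStepA]
  | cons i rest ih =>
    intro ps
    simp only [pvRowStepA, List.foldl_cons]
    split
    · exact le_trans (by simp) (ih (ps ++ [(x + i, y + row)]))
    · exact ih ps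

theorem pvRowStepA_len_lt (x y row count : Int) (ps : List (Int × Int)) (idxs : List Int)
    (h : (ps.length : Int) < count) (hne : idxs ≠ []) :
    ps.length < (pvRowStepA x y row count ps idxs).length := by
  cases idxs with
  | nil => exact absurd rfl hne
  | cons i rest =>
    simp only [pvRowStepA, List.foldl_cons, if_pos h]
    calc ps.length < (ps ++ [(x + i, y + row)]).length := by simp
      _ ≤ _ := pvRowStepA_len_le x y row count rest (ps ++ [(x + i, y + row)])

-- the outer 'while len(positions) < resources_count' loop
def pvLoopA (x y count : Int) (ps : List (Int × Int)) (row : Int) : List (Int × Int) :=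
  if h : (ps.length : Int) < count then
    pvLoopA x y count (pvRowStepA x y row count ps (pvIdxsA row)) (row + 1)
  else ps
termination_by (count - ps.length).toNat
decreasing_by
  have hlt : ps.length < (pvRowStepA x y row count ps (pvIdxsA row)).length := by
    apply pvRowStepA_len_lt x y row count ps _ h
    unfold pvIdxsA; split <;> decide
  omega

def zigzag_pattern_py (start_pos : Int × Int) (resources_count : Int) : List (Int × Int) :=
  PySem.List.slice (pvLoopA start_pos.1 start_pos.2 resources_count [] 0) none (some resources_count)

-- ===== PORT B =====
def zigzag_pattern_py_alt (start_pos : Int × Int) (resources_count : Int) : List (Int × Int) :=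
  (PySem.List.pyRange 0 resources_count 1).foldl
    (fun acc n =>
      let row := PySem.Int.floordiv n 5   -- divmod(n, 5); divisor 5 ≠ 0, never raises
      let k := PySem.Int.mod n 5
      let i := if PySem.Int.mod row 2 == 0 then k else 4 - k
      acc ++ [(start_pos.1 + i, start_pos.2 + row)])
    []

-- ===== PRECONDITION & SPEC =====
def Spec_zigzag_pattern_py (start_pos : Int × Int) (resources_count : Int) (out : List (Int × Int)) : Prop := out = zigzag_pattern_py_alt start_pos resources_count
instance (start_pos : Int × Int) (resources_count : Int) (out : List (Int × Int)) : Decidable (Spec_zigzag_pattern_py start_pos resources_count out) := by unfold Spec_zigzag_pattern_py; infer_instance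

-- ===== CLAIM (what is proved, stated in full; the proofs are below) =====
def Claim_equal_zigzag_pattern_py : Prop := ∀ (start_pos : Int × Int) (resources_count : Int), Dom_zigzag_pattern_py start_pos resources_count → Spec_zigzag_pattern_py start_pos resources_count (zigzag_pattern_py start_pos resources_count)

-- ===== LEMMAS AND PROOFS =====

-- the coordinate of item k within row r (B's conditional)
def pvCol (r k : Int) : Int := if PySem.Int.mod r 2 == 0 then k else 4 - k

-- the element B produces at flat index n, for a loop starting at row `row`
def pvG (x y row : Int) (n : Nat) : Int × Int :=
  (x + pvCol (row + (n / 5 : Nat)) ((n % 5 : Nat) : Int), y + (row + (n / 5 : Nat)))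

-- what A appends in one full row
def pvRowL (x y row : Int) : List (Int × Int) :=
  (pvIdxsA row).map (fun i => (x + i, y + row))

-- abstract description of A's remaining output: k more items starting at row `row`
def pvGen (x y row : Int) (k : Nat) : List (Int × Int) :=
  if k = 0 then [] else (pvRowL x y row).take k ++ pvGen x y (row + 1) (k - 5)
termination_by k
decreasing_by omega

theorem pvFold_stuck (x y row count : Int) (idxs : List Int) (ps : List (Int × Int))
    (h : ¬ (ps.length : Int) < count) : pvRowStepA x y row count ps idxs = ps := by
  induction idxs with
  | nil => simp [pvRowStepA]
  | cons i rest ih => simpa [pvRowStepA, if_neg h] using ih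

theorem pvRowStepA_char (x y row count : Int) (idxs : List Int) :
    ∀ ps : List (Int × Int),
    pvRowStepA x y row count ps idxs
      = ps ++ (idxs.map (fun i => (x + i, y + row))).take (count - ps.length).toNat := by
  induction idxs with
  | nil => intro ps; simp [pvRowStepA]
  | cons i rest ih =>
    intro ps
    by_cases h : (ps.length : Int) < count
    · have h1 : (count - ps.length).toNat = (count - (ps ++ [(x + i, y + row)]).length).toNat + 1 := by
        simp only [List.length_append, List.length_cons, List.length_nil]; omega
      simp only [pvRowStepA, List.foldl_cons, if_pos h] at *
      rw [ih (ps ++ [(x + i, y + row)]), h1]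
      simp
    · have h0 : (count - ps.length).toNat = 0 := by omega
      simp only [pvRowStepA, List.foldl_cons, if_neg h, h0, List.take_zero, List.append_nil]
      exact pvFold_stuck x y row count rest ps h

theorem pvIdxsA_even (row : Int) (h : (PySem.Int.mod row 2 == 0) = true) :
    pvIdxsA row = [0, 1, 2, 3, 4] := by
  unfold pvIdxsA; rw [if_pos h]; decide

theorem pvIdxsA_odd (row : Int) (h : ¬ (PySem.Int.mod row 2 == 0) = true) :
    pvIdxsA row = [4, 3, 2, 1, 0] := by
  unfold pvIdxsA; rw [if_neg h]; decide

theorem pvRowL_len (x y row : Int) : (pvRowL x y row).length = 5 := by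
  unfold pvRowL
  by_cases h : (PySem.Int.mod row 2 == 0) = true
  · rw [pvIdxsA_even row h]; rfl
  · rw [pvIdxsA_odd row h]; rfl

theorem pvLoopA_char (k : Nat) : ∀ (x y count row : Int) (ps : List (Int × Int)),
    (count - ps.length).toNat = k → pvLoopA x y count ps row = ps ++ pvGen x y row k := by
  induction k using Nat.strong_induction_on with
  | _ k ih =>
    intro x y count row ps hk
    by_cases h : (ps.length : Int) < count
    · rw [pvLoopA.eq_def, dif_pos h]
      have hrow : pvRowStepA x y row count ps (pvIdxsA row) = ps ++ (pvRowL x y row).take k := by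
        rw [pvRowStepA_char, hk]; rfl
      have hk0 : 0 < k := by omega
      have hlen : ((ps ++ (pvRowL x y row).take k).length : Int) = (ps.length : Int) + min k 5 := by
        simp [List.length_take, pvRowL_len]
      have hnext : (count - ((ps ++ (pvRowL x y row).take k).length : Int)).toNat = k - 5 := by
        rw [hlen]; omega
      rw [hrow, ih (k - 5) (by omega) x y count (row + 1) _ hnext]
      conv_rhs => rw [pvGen.eq_def]
      rw [if_neg (show ¬ k = 0 by omega)]
      simp
    · have hk0 : k = 0 := by omega
      rw [pvLoopA.eq_def, dif_neg h, hk0, pvGen.eq_def]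
      simp

theorem pvRowL_eq_map (x y row : Int) :
    pvRowL x y row = (List.range 5).map (fun n => (x + pvCol row ((n : Nat) : Int), y + row)) := by
  unfold pvRowL pvCol
  by_cases h : (PySem.Int.mod row 2 == 0) = true
  · rw [pvIdxsA_even row h]
    simp only [h, if_true, List.range_succ]
    norm_num
  · rw [pvIdxsA_odd row h]
    simp only [h, List.range_succ]
    norm_num

theorem pvGen_eq_map (k : Nat) : ∀ (x y row : Int),
    pvGen x y row k = (List.range k).map (pvG x y row) := by
  induction k using Nat.strong_induction_on with
  | _ k ih =>
    intro x y row
    by_cases h0 : k = 0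
    · rw [pvGen.eq_def, if_pos h0, h0]; rfl
    by_cases h5 : k ≤ 5
    · -- last, possibly partial row: take k of one row, recursion ends (k - 5 = 0)
      rw [pvGen.eq_def, if_neg h0]
      have h50 : k - 5 = 0 := by omega
      rw [h50, pvGen.eq_def, if_pos rfl, List.append_nil]
      rw [pvRowL_eq_map]
      have htake : ((List.range 5).map (fun n => (x + pvCol row ((n : Nat) : Int), y + row))).take k
          = (List.range k).map (fun n => (x + pvCol row ((n : Nat) : Int), y + row)) := by
        rw [← List.map_take, List.take_range, min_eq_left h5]
      rw [htake]
      apply List.map_congr_left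
      intro n hn
      have hn5 : n < 5 := by
        have := List.mem_range.mp hn; omega
      have h1 : n / 5 = 0 := by omega
      have h2 : n % 5 = n := by omega
      simp [pvG, h1, h2]
    · -- a full row then the rest
      rw [pvGen.eq_def, if_neg h0]
      have hk : k = 5 + (k - 5) := by omega
      have hfull : (pvRowL x y row).take k = pvRowL x y row :=
        List.take_of_length_le (by rw [pvRowL_len]; omega)
      have hsplit : List.range k = List.range 5 ++ (List.range (k - 5)).map (5 + ·) := by
        conv_lhs => rw [hk]
        exact List.range_add
      rw [hfull, ih (k - 5) (by omega) x y (row + 1)]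
      rw [hsplit, List.map_append, pvRowL_eq_map]
      congr 1
      · -- first 5 entries of pvG are exactly one row
        apply List.map_congr_left
        intro n hn
        have hn5 : n < 5 := List.mem_range.mp hn
        have h1 : n / 5 = 0 := by omega
        have h2 : n % 5 = n := by omega
        simp [pvG, h1, h2]
      · -- shifted entries: pvG (row) (5 + n) = pvG (row+1) n
        rw [List.map_map]
        apply List.map_congr_left
        intro n _
        have h1 : (5 + n) / 5 = n / 5 + 1 := by omega
        have h2 : (5 + n) % 5 = n % 5 := by omega
        simp only [Function.comp, pvG, h1, h2, Prod.mk.injEq]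
        constructor <;> push_cast <;> ring_nf

theorem pvDiv5 (n : Nat) : PySem.Int.floordiv (n : Int) 5 = ((n / 5 : Nat) : Int) := by
  exact_mod_cast PySem.Int.floordiv_natCast n 5

theorem pvMod5 (n : Nat) : PySem.Int.mod (n : Int) 5 = ((n % 5 : Nat) : Int) := by
  exact_mod_cast PySem.Int.mod_natCast n 5

theorem pvAlt_eq_map (x y c : Int) :
    zigzag_pattern_py_alt (x, y) c = (List.range c.toNat).map (pvG x y 0) := by
  unfold zigzag_pattern_py_alt
  by_cases hc : 0 ≤ c
  · have : c = ((c.toNat : Nat) : Int) := by omega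
    rw [this, PySem.List.pyRange_zero_natCast, List.foldl_map,
        PySem.List.foldl_append_singleton_eq_map, List.nil_append]
    apply List.map_congr_left
    intro n _
    simp only [pvG, pvCol]
    rw [pvDiv5, pvMod5]
    simp
  · have h1 : PySem.List.pyRange 0 c 1 = [] := by
      simp [PySem.List.pyRange]; omega
    have h2 : c.toNat = 0 := by omega
    simp [h1, h2]

theorem pvA_eq_map (x y c : Int) :
    zigzag_pattern_py (x, y) c = (List.range c.toNat).map (pvG x y 0) := by
  unfold zigzag_pattern_py
  have hloop : pvLoopA x y c [] 0 = [] ++ pvGen x y 0 c.toNat :=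
    pvLoopA_char c.toNat x y c 0 [] (by simp)
  rw [hloop, List.nil_append, pvGen_eq_map]
  by_cases hc : 0 ≤ c
  · rw [PySem.List.slice_to _ hc]
    exact List.take_of_length_le (by simp)
  · have h2 : c.toNat = 0 := by omega
    simp [h2, PySem.List.slice]

-- ===== VERDICT (by name: the statement is the Claim_ definition above) =====
theorem zigzag_pattern_py_spec : Claim_equal_zigzag_pattern_py := by
  intro ⟨x, y⟩ c _
  unfold Spec_zigzag_pattern_py
  rw [pvA_eq_map, pvAlt_eq_map]
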